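-- pv_equiv track=rewrite | github.com/Lod07/Iwv-Wortschatz | IWV_studentProject/studentcode_main.py | find_unique_words
-- ===== SOURCE A (Python) =====
-- from collections import Counter
--
-- def find_unique_words(word_list):
--     # Verwende Counter, um die Häufigkeit jedes Wortes zu zählen
--     word_counter = Counter(word for word, _, _ in word_list)
--
--     # Dictionary zum Verfolgen der Präfixe und ihrer zugehörigen Wörter
--     prefix_to_words = {}
--
--
--     for word, count in word_counter.items():
--         if count == 1 and not word.endswith(".") and not word.startswith(".") and not any(char.isdigit() for char in word):
--             # Präfix extrahieren
--             word_prefix = get_prefix(word)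
--
--             # Überprüfen, ob das aktuelle Präfix bereits existiert
--             if word_prefix in prefix_to_words:
--                 # Das aktuelle Wort wird zum Dictionary hinzugefügt, um alle Wörter mit dem gleichen Präfix zu speichern
--                 prefix_to_words[word_prefix].append(word)
--             else:
--                 # Das aktuelle Wort wird zum Dictionary hinzugefügt
--                 prefix_to_words[word_prefix] = [word]
--
--     # Liste der einzigartigen Wörter erstellen (nur Wörter mit einmaligem Präfix)
--     unique_words = [words[0] for words in prefix_to_words.values() if len(words) == 1]
--
--     return sorted(unique_words)
--
-- def get_prefix(word):
--     # Hier können Sie die Logik für das Extrahieren des Präfixes anpassen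
--     # In diesem Beispiel wird das Präfix als die ersten drei Buchstaben des Wortes genommen
--     return word[:3].lower()
-- ===== SOURCE B (Python) =====
-- from collections import Counter
--
-- def find_unique_words(word_list):
--     counts = Counter(word for word, _, _ in word_list)
--     valid = [w for w, c in counts.items()
--              if c == 1 and not w.endswith(".") and not w.startswith(".")
--              and not any(ch.isdigit() for ch in w)]
--     # sort the valid words by their lowercased 3-char prefix so that equal
--     # prefixes become adjacent, then keep the words whose neighbours both
--     # carry a different prefix (i.e. the prefix occurs exactly once)
--     by_pref = sorted(valid, key=lambda w: w[:3].lower())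
--     prefs = [w[:3].lower() for w in by_pref]
--     nexts = prefs[1:] + [None]
--     result = []
--     prev = None
--     for w, p, q in zip(by_pref, prefs, nexts):
--         if p != prev and p != q:
--             result.append(w)
--         prev = p
--     return sorted(result)
-- ===== Notes on version B (the rewrite author's own statement) =====
-- stated objective: alternative
-- what changed: Replaces A's hash grouping into per-prefix word lists by a sort-then-adjacent-scan: the valid words are sorted by their lowercased 3-char prefix and a single linear scan keeps exactly the words whose neighbouring prefixes differ (prefix occurs once), no prefix dictionary at all.
import Mathlib
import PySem

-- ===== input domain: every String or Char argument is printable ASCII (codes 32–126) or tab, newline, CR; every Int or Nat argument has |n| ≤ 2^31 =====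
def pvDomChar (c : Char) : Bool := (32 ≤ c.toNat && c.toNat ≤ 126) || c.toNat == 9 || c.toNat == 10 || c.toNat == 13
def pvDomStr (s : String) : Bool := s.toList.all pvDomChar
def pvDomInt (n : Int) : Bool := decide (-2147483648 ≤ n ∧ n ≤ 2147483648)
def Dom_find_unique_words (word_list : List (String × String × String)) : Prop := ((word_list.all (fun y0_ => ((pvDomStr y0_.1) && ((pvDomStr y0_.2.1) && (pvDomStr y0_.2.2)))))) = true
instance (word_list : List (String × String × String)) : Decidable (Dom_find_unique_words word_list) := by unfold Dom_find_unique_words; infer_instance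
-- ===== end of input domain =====

-- B replaces A's hash grouping into per-prefix lists by sort-by-prefix then a single
-- adjacent-neighbour scan keeping words whose prefix occurs once (alternative algorithm, same cost).


-- ===== PORT A =====
-- get_prefix(word) = word[:3].lower()
def get_prefix (word : String) : String :=
  PySem.Str.lower (PySem.Str.slice word none (some 3))

def find_unique_words (word_list : List (String × String × String)) : List String :=
  let word_counter := PySem.Dict.counter (word_list.map (fun y => y.1))
  let prefix_to_words : PySem.Dict String (List String) :=
    word_counter.items.foldl (fun d p =>
      let word := p.1
      let count := p.2
      if count == 1 && !(PySem.Str.endswith word ".") && !(PySem.Str.startswith word ".")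
          && !(word.toList.any PySem.Chars.isdigit) then
        let word_prefix := get_prefix word
        if d.contains word_prefix then
          d.insert word_prefix (d.getD word_prefix [] ++ [word])  -- prefix_to_words[word_prefix].append(word)
        else
          d.insert word_prefix [word]
      else d) PySem.Dict.empty
  -- words[0] is total here: the filter keeps only singleton lists
  let unique_words := (prefix_to_words.values.filter (fun ws => ws.length == 1)).map (fun ws => ws.headD "")
  PySem.List.sorted unique_words (fun x => x) false

-- ===== PORT B =====
def find_unique_words_alt (word_list : List (String × String × String)) : List String :=
  let counts := PySem.Dict.counter (word_list.map (fun y => y.1))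
  let valid := (counts.items.filter (fun p =>
      p.2 == 1 && !(PySem.Str.endswith p.1 ".") && !(PySem.Str.startswith p.1 ".")
      && !(p.1.toList.any PySem.Chars.isdigit))).map (fun p => p.1)
  let by_pref := PySem.List.sorted valid (fun w => PySem.Str.lower (PySem.Str.slice w none (some 3))) false
  let prefs := by_pref.map (fun w => PySem.Str.lower (PySem.Str.slice w none (some 3)))
  let nexts := (prefs.drop 1).map some ++ [(none : Option String)]
  let res := (by_pref.zip (prefs.zip nexts)).foldl
      (fun (st : List String × Option String) t =>
        ((if (some t.2.1 != st.2) && (some t.2.1 != t.2.2) then st.1 ++ [t.1] else st.1),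
          some t.2.1))
      ([], (none : Option String))
  PySem.List.sorted res.1 (fun x => x) false

-- ===== PRECONDITION & SPEC =====
def Spec_find_unique_words (word_list : List (String × String × String)) (out : List String) : Prop := out = find_unique_words_alt word_list
instance (word_list : List (String × String × String)) (out : List String) : Decidable (Spec_find_unique_words word_list out) := by unfold Spec_find_unique_words; infer_instance

-- ===== CLAIM (what is proved, stated in full; the proofs are below) =====
def Claim_equal_find_unique_words : Prop := ∀ (word_list : List (String × String × String)), Dom_find_unique_words word_list → Spec_find_unique_words word_list (find_unique_words word_list)

-- ===== LEMMAS AND PROOFS =====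

-- the validity predicate both programs apply to a (word, count) item
def pvPred (p : String × Int) : Bool :=
  p.2 == 1 && !(PySem.Str.endswith p.1 ".") && !(PySem.Str.startswith p.1 ".")
  && !(p.1.toList.any PySem.Chars.isdigit)

-- the group of valid words sharing prefix c
def pvGrp (V : List String) (c : String) : List String :=
  V.filter (fun w => get_prefix w == c)

lemma pv_step_eq (d : PySem.Dict String (List String)) (w : String) :
    (if d.contains (get_prefix w) then
        d.insert (get_prefix w) (d.getD (get_prefix w) [] ++ [w])
      else d.insert (get_prefix w) [w]) =
      d.modify (get_prefix w) [] (fun v => v ++ [w]) := by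
  by_cases h : d.contains (get_prefix w) = true
  · simp [h, PySem.Dict.modify]
  · have h' : d.contains (get_prefix w) = false := by simpa using h
    simp [h', PySem.Dict.modify, PySem.Dict.getD_of_not_contains (h := h')]

lemma pv_A_core (items : List (String × Int)) :
    PySem.List.sorted
      ((((items.foldl (fun d p =>
          if pvPred p then
            (if d.contains (get_prefix p.1) then
              d.insert (get_prefix p.1) (d.getD (get_prefix p.1) [] ++ [p.1])
            else d.insert (get_prefix p.1) [p.1])
          else d) PySem.Dict.empty).values).filter (fun ws => ws.length == 1)).map (fun ws => ws.headD ""))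
      (fun x => x) false
    = PySem.List.sorted
        (((PySem.Set.ofList (((items.filter pvPred).map (fun p => p.1)).map get_prefix)).filter
            (fun c => (pvGrp ((items.filter pvPred).map (fun p => p.1)) c).length == 1)).map
          (fun c => (pvGrp ((items.filter pvPred).map (fun p => p.1)) c).headD ""))
        (fun x => x) false := by
  set V := (items.filter pvPred).map (fun p => p.1) with hV
  have h1 : items.foldl (fun d p =>
          if pvPred p then
            (if d.contains (get_prefix p.1) then
              d.insert (get_prefix p.1) (d.getD (get_prefix p.1) [] ++ [p.1])
            else d.insert (get_prefix p.1) [p.1])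
          else d) PySem.Dict.empty
      = V.foldl (fun d w => d.modify (get_prefix w) [] (fun v => v ++ [w])) PySem.Dict.empty := by
    rw [hV, List.foldl_map, List.foldl_filter]
    congr 1
    funext d p
    by_cases h : pvPred p
    · simp [h, pv_step_eq]
    · simp [h]
  have hnodup : (V.foldl (fun d w => d.modify (get_prefix w) [] (fun v => v ++ [w])) PySem.Dict.empty).keys.Nodup := by
    exact PySem.Dict.nodup_keys_foldl_modify_key V get_prefix [] (fun d w => fun v => v ++ [w]) PySem.Dict.empty (by simp)
  have hkeys : (V.foldl (fun d w => d.modify (get_prefix w) [] (fun v => v ++ [w])) PySem.Dict.empty).keys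
      = PySem.Set.ofList (V.map get_prefix) := by
    rw [PySem.Dict.keys_foldl_modify_key V get_prefix [] (fun d w => fun v => v ++ [w]) PySem.Dict.empty]
    rfl
  have hgetD : ∀ c, (V.foldl (fun d w => d.modify (get_prefix w) [] (fun v => v ++ [w])) PySem.Dict.empty).getD c [] = pvGrp V c := by
    intro c
    have h2 := PySem.Dict.getD_foldl_modify_append (V.map (fun w => (get_prefix w, w))) PySem.Dict.empty c
    rw [List.foldl_map] at h2
    rw [h2, List.filter_map, List.map_map]
    simp [pvGrp, Function.comp_def]
  have hvals : (V.foldl (fun d w => d.modify (get_prefix w) [] (fun v => v ++ [w])) PySem.Dict.empty).values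
      = (PySem.Set.ofList (V.map get_prefix)).map (fun c => pvGrp V c) := by
    rw [PySem.Dict.values_eq_map_keys _ hnodup [], hkeys]
    exact List.map_congr_left (fun c _ => by rw [hgetD c])
  rw [h1, hvals, List.filter_map, List.map_map]
  rfl

lemma pv_A_eq (word_list : List (String × String × String)) :
    find_unique_words word_list =
      PySem.List.sorted
        (((PySem.Set.ofList
            (((PySem.Dict.counter (word_list.map (fun y => y.1))).items.filter pvPred).map (fun p => p.1)
              |>.map get_prefix)).filter
            (fun c => (pvGrp (((PySem.Dict.counter (word_list.map (fun y => y.1))).items.filter pvPred).map (fun p => p.1)) c).length == 1)).map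
          (fun c => (pvGrp (((PySem.Dict.counter (word_list.map (fun y => y.1))).items.filter pvPred).map (fun p => p.1)) c).headD ""))
        (fun x => x) false := by
  unfold find_unique_words
  dsimp only
  exact pv_A_core _

lemma pv_valid_nodup (word_list : List (String × String × String)) :
    (((PySem.Dict.counter (word_list.map (fun y => y.1))).items.filter pvPred).map (fun p => p.1)).Nodup := by
  rw [PySem.Dict.items_counter, List.filter_map, List.map_map]
  have h : ((fun p : String × Int => p.1) ∘ (fun k => (k, ((word_list.map (fun y => y.1)).count k : Int)))) = id := rfl
  rw [h, List.map_id]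
  exact (PySem.Set.nodup_ofList _).filter _

lemma pv_grp_mem_pref {V : List String} {c x : String} (hx : x ∈ pvGrp V c) :
    get_prefix x = c ∧ x ∈ V := by
  rw [pvGrp, List.mem_filter] at hx
  exact ⟨by simpa using hx.2, hx.1⟩

lemma pv_grp_singleton {V : List String} {c x : String} (hlen : (pvGrp V c).length = 1)
    (hx : x ∈ pvGrp V c) : pvGrp V c = [x] := by
  obtain ⟨a, ha⟩ := List.length_eq_one_iff.mp hlen
  rw [ha] at hx ⊢
  simp only [List.mem_singleton] at hx
  rw [hx]

-- core combinatorial fact: on a Nodup list V, selecting the head of every singleton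
-- prefix-group (A) is a permutation of keeping words whose own group is a singleton
lemma pv_perm (V : List String) (hV : V.Nodup) :
    (((PySem.Set.ofList (V.map get_prefix)).filter (fun c => (pvGrp V c).length == 1)).map
        (fun c => (pvGrp V c).headD "")).Perm
      (V.filter (fun w => (pvGrp V (get_prefix w)).length == 1)) := by
  refine (List.perm_ext_iff_of_nodup ?_ (hV.filter _)).mpr ?_
  · apply List.Nodup.map_on
    · intro c1 h1 c2 h2 heq
      rw [List.mem_filter] at h1 h2
      have l1 : (pvGrp V c1).length = 1 := by simpa using h1.2
      have l2 : (pvGrp V c2).length = 1 := by simpa using h2.2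
      obtain ⟨a1, e1⟩ := List.length_eq_one_iff.mp l1
      obtain ⟨a2, e2⟩ := List.length_eq_one_iff.mp l2
      have m1 : a1 ∈ pvGrp V c1 := by rw [e1]; simp
      have m2 : a2 ∈ pvGrp V c2 := by rw [e2]; simp
      have p1 := (pv_grp_mem_pref m1).1
      have p2 := (pv_grp_mem_pref m2).1
      rw [e1, e2] at heq
      simp only [List.headD_cons] at heq
      rw [← p1, ← p2, heq]
    · exact (PySem.Set.nodup_ofList _).filter _
  · intro x
    constructor
    · intro hx
      rw [List.mem_map] at hx
      obtain ⟨c, hc, hhead⟩ := hx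
      rw [List.mem_filter] at hc
      have hlen : (pvGrp V c).length = 1 := by simpa using hc.2
      obtain ⟨a, ha⟩ := List.length_eq_one_iff.mp hlen
      have hxa : a = x := by rw [ha] at hhead; simpa using hhead
      subst hxa
      have hmem : a ∈ pvGrp V c := by rw [ha]; simp
      obtain ⟨hpref, hVm⟩ := pv_grp_mem_pref hmem
      rw [List.mem_filter]
      refine ⟨hVm, ?_⟩
      rw [hpref]
      simpa using hlen
    · intro hx
      rw [List.mem_filter] at hx
      obtain ⟨hVm, hlen'⟩ := hx
      have hlen : (pvGrp V (get_prefix x)).length = 1 := by simpa using hlen'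
      have hmem : x ∈ pvGrp V (get_prefix x) := by simp [pvGrp, List.mem_filter, hVm]
      rw [List.mem_map]
      refine ⟨get_prefix x, ?_, ?_⟩
      · rw [List.mem_filter]
        refine ⟨?_, by simpa using hlen⟩
        rw [PySem.Set.mem_ofList]
        exact List.mem_map_of_mem hVm
      · rw [pv_grp_singleton hlen hmem]
        rfl

-- ===== B-side lemmas: the adjacent-neighbour scan =====

-- reference form of B's scan loop
def pvScan (f : String → String) (prev : Option String) : List String → List String
  | [] => []
  | w :: rest =>
      (if (some (f w) != prev) && (some (f w) != (rest.head?).map f)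
       then [w] else []) ++ pvScan f (some (f w)) rest

lemma pv_zip3_cons (f : String → String) (w : String) (rest : List String) :
    (w :: rest).zip (((w :: rest).map f).zip
        ((((w :: rest).map f).drop 1).map some ++ [(none : Option String)]))
    = (w, f w, (rest.head?).map f) ::
      rest.zip ((rest.map f).zip
        (((rest.map f).drop 1).map some ++ [(none : Option String)])) := by
  cases rest with
  | nil => rfl
  | cons r rs => rfl

lemma pv_fold_eq (f : String → String) (s : List String) (out : List String) (prev : Option String) :
    ((s.zip ((s.map f).zip
        (((s.map f).drop 1).map some ++ [(none : Option String)]))).foldl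
      (fun (st : List String × Option String) t =>
        ((if (some t.2.1 != st.2) && (some t.2.1 != t.2.2) then st.1 ++ [t.1] else st.1),
          some t.2.1))
      (out, prev)).1 = out ++ pvScan f prev s := by
  induction s generalizing out prev with
  | nil => simp [pvScan]
  | cons w rest ih =>
      rw [pv_zip3_cons f]
      simp only [List.foldl_cons]
      rw [ih]
      by_cases h : ((some (f w) != prev) && (some (f w) != (rest.head?).map f)) = true
      · simp [pvScan, h, List.append_assoc]
      · simp only [Bool.not_eq_true] at h
        simp [pvScan, h]


-- the tail filters agree: words sharing the head's prefix fail both conditions,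
-- the others compare equal counts and an unreachable prev
lemma pv_tail_filter_eq (f : String → String) (w : String) (rest : List String) (prev : Option String)
    (hwle : ∀ u ∈ rest, f w ≤ f u)
    (hprev : ∀ q, prev = some q → ∀ u ∈ w :: rest, q ≤ f u) :
    rest.filter (fun u =>
      (some (f u) != some (f w)) &&
      (rest.countP (fun v => f v == f u) == 1))
    = rest.filter (fun u =>
      (some (f u) != prev) &&
      ((w :: rest).countP (fun v => f v == f u) == 1)) := by
  apply List.filter_congr
  intro u hu
  by_cases he : f u = f w
  · have hL : (some (f u) != some (f w)) = false := by simp [he]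
    have h1 : rest.countP (fun v => f v == f u) ≥ 1 := by
      have hm : u ∈ rest.filter (fun v => f v == f u) :=
        List.mem_filter.mpr ⟨hu, by simp⟩
      have hp := List.length_pos_of_mem hm
      rwa [← List.countP_eq_length_filter] at hp
    have h2 : (w :: rest).countP (fun v => f v == f u)
        = rest.countP (fun v => f v == f u) + 1 :=
      List.countP_cons_of_pos (by simp [he])
    have hR : (((w :: rest).countP (fun v => f v == f u)) == 1) = false := by
      rw [h2]
      have hne : rest.countP (fun v => f v == f u) + 1 ≠ 1 := by omega
      simpa using hne
    rw [hL, hR]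
    simp
  · have hL : (some (f u) != some (f w)) = true := by simp [he]
    have hR1 : (some (f u) != prev) = true := by
      cases prev with
      | none => rfl
      | some q =>
          have hq : q ≤ f w := hprev q rfl w (by simp)
          have hwu : f w ≤ f u := hwle u hu
          have hne : q ≠ f u := by
            intro hqe
            apply he
            apply le_antisymm _ hwu
            rw [← hqe]
            exact hq
          simpa using fun hc => hne hc.symm
    have h2 : (w :: rest).countP (fun v => f v == f u)
        = rest.countP (fun v => f v == f u) :=
      List.countP_cons_of_neg (by simp [Ne.symm he])
    rw [hL, hR1, h2]

-- in a prefix-sorted list, no later element shares the head's prefix iff the next one doesn't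
lemma pv_count_head {f : String → String} {w : String} {rest : List String}
    (hp : (w :: rest).Pairwise (fun a b => f a ≤ f b)) :
    (rest.countP (fun u => f u == f w) = 0) ↔
      (rest.head?).map f ≠ some (f w) := by
  cases rest with
  | nil => simp
  | cons r rs =>
      rw [List.countP_eq_zero]
      simp only [List.head?_cons, Option.map_some, ne_eq, Option.some.injEq]
      constructor
      · intro h hr
        exact absurd (by simpa using hr) (by simpa using h r (by simp))
      · intro hne u hu heq
        have heq' : f u = f w := by simpa using heq
        have h1 : f w ≤ f r := (List.pairwise_cons.mp hp).1 r (by simp)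
        have h2 : f r ≤ f u := by
          rcases List.mem_cons.mp hu with h | h
          · exact le_of_eq (by rw [h])
          · exact (List.pairwise_cons.mp (List.pairwise_cons.mp hp).2).1 u h
        rw [heq'] at h2
        exact hne (le_antisymm h2 h1)

-- the scan over a prefix-sorted list keeps exactly the words whose prefix occurs once
lemma pv_scan_eq_filter (f : String → String) (s : List String) : ∀ (prev : Option String),
    s.Pairwise (fun a b => f a ≤ f b) →
    (∀ q, prev = some q → ∀ u ∈ s, q ≤ f u) →
    pvScan f prev s = s.filter (fun u =>
      (some (f u) != prev) &&
      (s.countP (fun v => f v == f u) == 1)) := by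
  induction s with
  | nil => intro prev _ _; simp [pvScan]
  | cons w rest ih =>
      intro prev hs hprev
      have hrest : rest.Pairwise (fun a b => f a ≤ f b) :=
        (List.pairwise_cons.mp hs).2
      have hwle : ∀ u ∈ rest, f w ≤ f u := (List.pairwise_cons.mp hs).1
      have hih := ih (some (f w)) hrest
        (fun q hq u hu => by cases hq; exact hwle u hu)
      have hch := pv_count_head hs
      have hcp : (w :: rest).countP (fun v => f v == f w)
          = rest.countP (fun v => f v == f w) + 1 :=
        List.countP_cons_of_pos (by simp)
      have hcnt : (((w :: rest).countP (fun v => f v == f w)) == 1)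
          = (some (f w) != (rest.head?).map f) := by
        rw [hcp, Bool.eq_iff_iff]
        simp only [beq_iff_eq, bne_iff_ne, ne_eq]
        constructor
        · intro h1 hc
          exact hch.mp (by omega) hc.symm
        · intro h2
          have h0 := hch.mpr (fun hc => h2 hc.symm)
          omega
      have hcond : ((some (f w) != prev) &&
            (((w :: rest).countP (fun v => f v == f w)) == 1))
          = ((some (f w) != prev) &&
            (some (f w) != (rest.head?).map f)) := by
        rw [hcnt]
      simp only [pvScan]
      rw [hih, List.filter_cons, hcond]
      by_cases hc : ((some (f w) != prev) &&
          (some (f w) != (rest.head?).map f)) = true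
      · rw [if_pos hc, if_pos hc, pv_tail_filter_eq f w rest prev hwle hprev]
        simp
      · rw [if_neg hc, if_neg hc, pv_tail_filter_eq f w rest prev hwle hprev]
        simp

-- B's fold over the zipped neighbours, for an arbitrary valid-word list
lemma pv_B_core (f : String → String) (V : List String) :
    PySem.List.sorted
      (((PySem.List.sorted V f false).zip
        (((PySem.List.sorted V f false).map f).zip
          ((((PySem.List.sorted V f false).map f).drop 1).map some
            ++ [(none : Option String)]))).foldl
        (fun (st : List String × Option String) t =>
          ((if (some t.2.1 != st.2) && (some t.2.1 != t.2.2) then st.1 ++ [t.1] else st.1),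
            some t.2.1))
        ([], (none : Option String))).1 (fun x => x) false
    = PySem.List.sorted (pvScan f none (PySem.List.sorted V f false)) (fun x => x) false := by
  rw [pv_fold_eq f, List.nil_append]

lemma pv_B_eq (word_list : List (String × String × String)) :
    find_unique_words_alt word_list =
      PySem.List.sorted
        (pvScan get_prefix none (PySem.List.sorted
          (((PySem.Dict.counter (word_list.map (fun y => y.1))).items.filter pvPred).map (fun p => p.1))
          get_prefix false))
        (fun x => x) false := by
  unfold find_unique_words_alt
  dsimp only
  exact pv_B_core _ _

-- ===== VERDICT (by name: the statement is the Claim_ definition above) =====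
theorem find_unique_words_spec : Claim_equal_find_unique_words := by
  intro word_list _
  show _ = _
  rw [pv_A_eq, pv_B_eq]
  set V := (((PySem.Dict.counter (word_list.map (fun y => y.1))).items.filter pvPred).map (fun p => p.1)) with hV
  set S := PySem.List.sorted V get_prefix false with hS
  have hperm : S.Perm V := PySem.List.sorted_perm V get_prefix false
  have hpair : S.Pairwise (fun a b => get_prefix a ≤ get_prefix b) :=
    PySem.List.sorted_pairwise V get_prefix
  have hscan := pv_scan_eq_filter get_prefix S none hpair (by intro q hq; cases hq)
  have hfc : S.filter (fun u =>
        (some (get_prefix u) != none) &&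
        (S.countP (fun v => get_prefix v == get_prefix u) == 1))
      = S.filter (fun w => (pvGrp V (get_prefix w)).length == 1) := by
    apply List.filter_congr
    intro u _
    have h1 : (some (get_prefix u) != (none : Option String)) = true := rfl
    have h2 : S.countP (fun v => get_prefix v == get_prefix u)
        = (pvGrp V (get_prefix u)).length := by
      rw [hperm.countP_eq, pvGrp, List.countP_eq_length_filter]
    rw [h1, h2, Bool.true_and]
  rw [hscan, hfc]
  exact PySem.List.sorted_eq_sorted_of_perm _ _ _ (fun a b h => h)
    ((pv_perm V (pv_valid_nodup word_list)).trans (hperm.filter _).symm)
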